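-- pv_equiv track=rewrite | github.com/ceokereke/test_case_pr | benchmarks/printtokens/tcp_cso_ga.py | are_elements_swapped
-- ===== SOURCE A (Python) =====
-- def are_elements_swapped(original, swapped):
--     if sorted(original) != sorted(swapped):  # Check if they contain the same elements
--         return False
--
--     # Find indices where elements differ
--     differences = [(i, original[i], swapped[i]) for i in range(len(original)) if original[i] != swapped[i]]
--
--     # There should be exactly two differences, and swapping them should make the lists identical
--     if len(differences) == 2:
--         (i1, o1, s1), (i2, o2, s2) = differences
--         return o1 == s2 and o2 == s1
--
--     return False
-- ===== SOURCE B (Python) =====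
-- def are_elements_swapped(original, swapped):
--     if len(original) != len(swapped):
--         return False
--     mismatches = []
--     for pair in zip(original, swapped):
--         if pair[0] != pair[1]:
--             if len(mismatches) == 2:
--                 return False  # a third mismatch: cannot be a single swap
--             mismatches.append(pair)
--     if len(mismatches) == 2:
--         (a1, b1), (a2, b2) = mismatches
--         return a1 == b2 and a2 == b1
--     return False
-- ===== Notes on version B (the rewrite author's own statement) =====
-- stated objective: faster
-- what changed: B drops the two O(n log n) sorts entirely: one linear pass over the zipped lists collects mismatching pairs and bails out at the third mismatch, returning True iff exactly two mismatches exist and they are cross-equal (which already implies equal multisets).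
import Mathlib
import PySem

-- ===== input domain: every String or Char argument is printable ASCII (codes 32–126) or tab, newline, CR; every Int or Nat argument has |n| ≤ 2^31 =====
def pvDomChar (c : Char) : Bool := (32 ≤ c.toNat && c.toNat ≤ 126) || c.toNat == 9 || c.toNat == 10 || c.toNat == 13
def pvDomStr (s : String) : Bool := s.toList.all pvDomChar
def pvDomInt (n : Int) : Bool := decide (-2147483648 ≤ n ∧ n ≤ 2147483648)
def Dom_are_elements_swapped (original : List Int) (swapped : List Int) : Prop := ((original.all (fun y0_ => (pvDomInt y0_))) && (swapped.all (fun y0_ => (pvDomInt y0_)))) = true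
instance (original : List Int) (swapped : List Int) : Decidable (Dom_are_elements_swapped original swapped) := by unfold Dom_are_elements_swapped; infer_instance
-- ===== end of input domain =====

-- B replaces A's two sorts + index comprehension by one linear zip pass over the two lists (objective: faster, O(n) vs O(n log n)).

-- ===== PORT A =====
-- the comprehension [(i, original[i], swapped[i]) for i in range(len(original)) if original[i] != swapped[i]];
-- the indexing is in range whenever this line is reached (sorted equal ⇒ equal lengths), so pyGetD is exact here
def pvDiffsA (original : List Int) (swapped : List Int) : List (Int × Int × Int) :=
  (PySem.List.pyRange 0 original.length 1).filterMap (fun i =>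
    let oi := PySem.List.pyGetD original i 0
    let si := PySem.List.pyGetD swapped i 0
    if oi ≠ si then some (i, oi, si) else none)

def are_elements_swapped (original : List Int) (swapped : List Int) : Bool :=
  if PySem.List.sorted original (fun x => x) false ≠ PySem.List.sorted swapped (fun x => x) false then
    false
  else
    let differences := pvDiffsA original swapped
    if differences.length = 2 then
      match differences with
      | [(_, o1, s1), (_, o2, s2)] => o1 == s2 && o2 == s1
      | _ => false
    else
      false

-- ===== PORT B =====
-- the for-loop over zip(original, swapped): collect mismatching pairs, bail out (none) at a third one
def pvScan : List (Int × Int) → List (Int × Int) → Option (List (Int × Int))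
  | [], acc => some acc
  | p :: rest, acc =>
    if p.1 != p.2 then
      if acc.length = 2 then none
      else pvScan rest (acc ++ [p])
    else pvScan rest acc

def are_elements_swapped_alt (original : List Int) (swapped : List Int) : Bool :=
  if original.length ≠ swapped.length then
    false
  else
    match pvScan (original.zip swapped) [] with
    | none => false
    | some mismatches =>
      if mismatches.length = 2 then
        let p := mismatches[0]!
        let q := mismatches[1]!
        p.1 == q.2 && q.1 == p.2
      else
        false

-- ===== PRECONDITION & SPEC =====
def Spec_are_elements_swapped (original : List Int) (swapped : List Int) (out : Bool) : Prop := out = are_elements_swapped_alt original swapped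
instance (original : List Int) (swapped : List Int) (out : Bool) : Decidable (Spec_are_elements_swapped original swapped out) := by unfold Spec_are_elements_swapped; infer_instance

-- ===== CLAIM (what is proved, stated in full; the proofs are below) =====
def Claim_equal_are_elements_swapped : Prop := ∀ (original : List Int) (swapped : List Int), Dom_are_elements_swapped original swapped → Spec_are_elements_swapped original swapped (are_elements_swapped original swapped)

-- ===== LEMMAS AND PROOFS =====

-- the early-exit loop computes the mismatch filter, or none once a third mismatch appears
lemma pvScan_spec : ∀ (l acc : List (Int × Int)), acc.length ≤ 2 →
    pvScan l acc = if (acc ++ l.filter (fun p => p.1 != p.2)).length ≤ 2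
      then some (acc ++ l.filter (fun p => p.1 != p.2)) else none := by
  intro l
  induction l with
  | nil => intro acc h; simp [pvScan, h]
  | cons p rest ih =>
    intro acc h
    by_cases hp : (p.1 != p.2) = true
    · rw [show pvScan (p :: rest) acc
          = if acc.length = 2 then none else pvScan rest (acc ++ [p]) from by
            simp [pvScan, hp]]
      rw [show (p :: rest).filter (fun q => q.1 != q.2)
          = p :: rest.filter (fun q => q.1 != q.2) from by simp [hp]]
      by_cases h2 : acc.length = 2
      · rw [if_pos h2, if_neg (by simp [h2])]
      · rw [if_neg h2, ih (acc ++ [p]) (by simp; omega)]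
        simp only [List.append_assoc, List.singleton_append]
    · rw [show pvScan (p :: rest) acc = pvScan rest acc from by simp [pvScan, hp]]
      rw [show (p :: rest).filter (fun q => q.1 != q.2)
          = rest.filter (fun q => q.1 != q.2) from by simp [hp]]
      exact ih acc h

-- B, rewritten through pvScan_spec into the early-exit-free filter form the remaining lemmas use
lemma pvAlt_eq_filter_form (o s : List Int) :
    are_elements_swapped_alt o s =
      (if o.length ≠ s.length then false
       else
         let mismatches := (o.zip s).filter (fun p => p.1 != p.2)
         if mismatches.length = 2 then
           let p := mismatches[0]!
           let q := mismatches[1]!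
           p.1 == q.2 && q.1 == p.2
         else
           false) := by
  unfold are_elements_swapped_alt
  by_cases hlen : o.length = s.length
  · rw [if_neg (not_not_intro hlen), if_neg (not_not_intro hlen)]
    rw [pvScan_spec _ [] (by simp)]
    simp only [List.nil_append]
    by_cases h2 : ((o.zip s).filter (fun p => p.1 != p.2)).length ≤ 2
    · rw [if_pos h2]
    · rw [if_neg h2, if_neg (by omega)]
  · rw [if_pos hlen, if_pos hlen]


-- clean index-free form of the comprehension, proved by simultaneous induction
lemma pvClean_eq_filter : ∀ (o s : List Int), o.length = s.length →
    (List.range o.length).filterMap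
      (fun k => if o.getD k 0 ≠ s.getD k 0 then some (o.getD k 0, s.getD k 0) else none)
    = (o.zip s).filter (fun p => p.1 != p.2) := by
  intro o s h
  induction o generalizing s with
  | nil => cases s with
    | nil => simp
    | cons b t => simp at h
  | cons a o ih =>
    cases s with
    | nil => simp at h
    | cons b t =>
      have ih' := ih t (by simpa using h)
      rw [List.length_cons, List.range_succ_eq_map, List.filterMap_cons, List.filterMap_map]
      have htail : List.filterMap
          ((fun k => if (a :: o).getD k 0 ≠ (b :: t).getD k 0 then
              some ((a :: o).getD k 0, (b :: t).getD k 0) else none) ∘ Nat.succ)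
          (List.range o.length)
          = (o.zip t).filter (fun p => p.1 != p.2) := by
        rw [← ih']
        apply List.filterMap_congr
        intro k _
        simp
      by_cases hab : a = b
      · subst hab
        simp only [List.getD_cons_zero, ne_eq, not_true_eq_false, if_false]
        rw [htail]
        simp
      · simp only [List.getD_cons_zero, ne_eq, hab, not_false_eq_true, if_pos]
        rw [htail]
        have : (a != b) = true := by simpa using hab
        simp [this]

-- A's difference triples, projected to their value pairs, are exactly B's mismatch list
lemma pvDiffsA_map_proj (o s : List Int) (h : o.length = s.length) :
    (pvDiffsA o s).map (fun t => (t.2.1, t.2.2)) = (o.zip s).filter (fun p => p.1 != p.2) := by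
  unfold pvDiffsA
  rw [show ((o.length : Int)) = ((o.length : Nat) : Int) from rfl, PySem.List.pyRange_zero_natCast]
  rw [List.filterMap_map, List.map_filterMap, ← pvClean_eq_filter o s h]
  apply List.filterMap_congr
  intro k _
  simp only [Function.comp_apply, PySem.List.pyGetD_natCast]
  split_ifs <;> rfl

-- multiset bookkeeping for the mismatch pairs of two equal-length lists
lemma pvMultiset_mismatch : ∀ (o s : List Int), o.length = s.length →
    (o : Multiset Int) + (((o.zip s).filter (fun p => p.1 != p.2)).map Prod.snd : List Int) =
    (s : Multiset Int) + (((o.zip s).filter (fun p => p.1 != p.2)).map Prod.fst : List Int) := by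
  intro o s h
  induction o generalizing s with
  | nil => cases s with
    | nil => simp
    | cons b t => simp at h
  | cons a o ih =>
    cases s with
    | nil => simp at h
    | cons b t =>
      have ih' := ih t (by simpa using h)
      by_cases hab : a = b
      · subst hab
        simp only [List.zip_cons_cons, List.filter_cons, bne_self_eq_false, Bool.false_eq_true,
          if_false]
        rw [← Multiset.cons_coe, ← Multiset.cons_coe, Multiset.cons_add, Multiset.cons_add, ih']
      · have hb : (a != b) = true := by simpa using hab
        simp only [List.zip_cons_cons, List.filter_cons, hb, if_true, List.map_cons]
        rw [← Multiset.cons_coe, ← Multiset.cons_coe, ← Multiset.cons_coe, ← Multiset.cons_coe,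
          Multiset.cons_add, Multiset.cons_add, Multiset.add_cons, Multiset.add_cons, ih']
        exact Multiset.cons_swap a b _

-- B = true forces a permutation, hence equal stable sorts
lemma pvAlt_true_sorted_eq (o s : List Int) (h : are_elements_swapped_alt o s = true) :
    PySem.List.sorted o (fun x => x) false = PySem.List.sorted s (fun x => x) false := by
  rw [pvAlt_eq_filter_form] at h
  by_cases hlen : o.length = s.length
  · rw [if_neg (not_not_intro hlen)] at h
    rcases hms : (o.zip s).filter (fun p => p.1 != p.2) with
      _ | ⟨⟨a1, b1⟩, _ | ⟨⟨a2, b2⟩, _ | ⟨p3, ms⟩⟩⟩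
    · rw [hms] at h; simp at h
    · rw [hms] at h; simp at h
    · rw [hms] at h
      simp at h
      obtain ⟨h1, h2⟩ := h
      have hmul := pvMultiset_mismatch o s hlen
      rw [hms] at hmul
      simp only [List.map_cons, List.map_nil] at hmul
      have hos : (o : Multiset Int) = (s : Multiset Int) := by
        subst h1 h2
        have hsw : ((([a2, a1] : List Int)) : Multiset Int) = (([a1, a2] : List Int) : Multiset Int) := by
          rw [← Multiset.cons_coe, ← Multiset.cons_coe, ← Multiset.cons_coe, ← Multiset.cons_coe]
          exact Multiset.cons_swap a2 a1 _
        rw [hsw] at hmul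
        exact add_right_cancel hmul
      have hperm : o.Perm s := Multiset.coe_eq_coe.mp hos
      have h1p : (PySem.List.sorted o (fun x => x) false).Perm s :=
        (PySem.List.sorted_perm o (fun x => x) false).trans hperm
      exact (PySem.List.sorted_id_eq_of_perm_of_pairwise s
        (PySem.List.sorted o (fun x => x) false) h1p
        (PySem.List.sorted_pairwise o (fun x => x))).symm
    · rw [hms] at h; simp at h
  · rw [if_pos hlen] at h
    exact absurd h (by simp)

-- ===== VERDICT (by name: the statement is the Claim_ definition above) =====
theorem are_elements_swapped_spec : Claim_equal_are_elements_swapped := by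
  unfold Claim_equal_are_elements_swapped Spec_are_elements_swapped
  intro o s _
  by_cases hsort : PySem.List.sorted o (fun x => x) false = PySem.List.sorted s (fun x => x) false
  · -- sorted lists equal ⇒ permutation ⇒ equal lengths; both sides inspect the same mismatch list
    have hperm : o.Perm s :=
      (PySem.List.sorted_perm o (fun x => x) false).symm.trans
        (hsort ▸ PySem.List.sorted_perm s (fun x => x) false)
    have hlen : o.length = s.length := hperm.length_eq
    have hproj := pvDiffsA_map_proj o s hlen
    unfold are_elements_swapped
    rw [pvAlt_eq_filter_form]
    rw [if_neg (not_not_intro hsort), if_neg (not_not_intro hlen), ← hproj]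
    rcases pvDiffsA o s with _ | ⟨⟨i1, o1, s1⟩, _ | ⟨⟨i2, o2, s2⟩, _ | ⟨t3, ds⟩⟩⟩
    · simp
    · simp
    · simp
    · simp
  · -- A returns False; B must too (B = true would force equal sorted lists)
    unfold are_elements_swapped
    rw [if_pos (by simpa using hsort)]
    by_contra hB
    exact hsort (pvAlt_true_sorted_eq o s (by
      cases hb : are_elements_swapped_alt o s
      · exact absurd hb.symm hB
      · rfl))
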